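-- pv_equiv track=rewrite | github.com/iakonk/MyHomeRepos | python/examples/codility/lesson_1/max_bin_gap.py | find_max_bin_gap
-- ===== SOURCE A (Python) =====
-- def is_last_bit_non_zero(positive_number):
--     """
--       11101010
--       &
--       00000001
--       --------
--     = 00000000
--                 OR
--       11101011
--       &
--       00000001
--       --------
--     = 00000001
--     """
--     return positive_number & 1
--
-- def do_right_shift(positive_number):
--     return positive_number >> 1
--
-- def find_max_bin_gap(positive_number):
--     prev_non_zero_ind = None
--     current_ind = 0
--     max_gap = 0
--
--     while positive_number > 0:
--
--         if is_last_bit_non_zero(positive_number):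
--             if prev_non_zero_ind is not None:
--                 max_gap = max(max_gap, current_ind - prev_non_zero_ind - 1)
--             prev_non_zero_ind = current_ind
--
--         current_ind += 1
--         positive_number = do_right_shift(positive_number)
--
--     return max_gap
-- ===== SOURCE B (Python) =====
-- def _trailing_zeros(m):
--     t = 0
--     while m % 2 == 0 and m > 0:
--         m //= 2
--         t += 1
--     return t
--
-- def find_max_bin_gap(positive_number):
--     if positive_number <= 1:
--         return 0
--     q, r = divmod(positive_number, 2)
--     if r:
--         return max(find_max_bin_gap(q), _trailing_zeros(q))
--     return find_max_bin_gap(q)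
-- ===== Notes on version B (the rewrite author's own statement) =====
-- stated objective: alternative
-- what changed: Replaces A's iterative LSB-to-MSB scan with index bookkeeping (previous one-bit index kept in an Optional, gap = index difference) by a top-down recursion on the halved number that, at each odd step, maxes the result with the trailing-zero count of the remaining bits; no indices and no Optional state.
import Mathlib
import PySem

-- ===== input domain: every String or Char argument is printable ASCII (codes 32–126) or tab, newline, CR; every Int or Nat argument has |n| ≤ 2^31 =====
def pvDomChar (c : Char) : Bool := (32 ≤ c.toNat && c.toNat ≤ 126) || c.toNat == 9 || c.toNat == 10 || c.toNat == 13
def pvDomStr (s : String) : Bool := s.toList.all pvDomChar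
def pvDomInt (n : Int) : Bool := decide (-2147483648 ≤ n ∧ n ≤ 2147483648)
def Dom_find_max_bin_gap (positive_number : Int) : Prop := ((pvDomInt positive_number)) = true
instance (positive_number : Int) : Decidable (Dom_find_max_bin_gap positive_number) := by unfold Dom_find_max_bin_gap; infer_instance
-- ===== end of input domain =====

-- B replaces A's LSB scan (index bookkeeping with an Option for the previous one-bit) by a
-- top-down recursion on the halved number that maxes each odd step with the trailing-zero count; objective: alternative.

-- termination helpers for the loops (cited by decreasing_by)
theorem pv_shift_lt (n : Int) (h : 0 < n) : (n >>> (1:Nat)).toNat < n.toNat := by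
  rw [Int.shiftRight_eq_div_pow]; norm_num; omega

theorem pv_half_lt (m : Int) (h : 0 < m) : (PySem.Int.floordiv m 2).toNat < m.toNat := by
  rw [PySem.Int.floordiv_eq_ediv_of_pos (by norm_num)]; omega

-- ===== PORT A =====
def is_last_bit_non_zero (positive_number : Int) : Int :=
  PySem.Int.band positive_number 1

def do_right_shift (positive_number : Int) : Int :=
  positive_number >>> (1:Nat)

-- the while-loop of A, state (positive_number, prev_non_zero_ind, current_ind, max_gap)
def findLoopA (positive_number : Int) (prev_non_zero_ind : Option Int)
    (current_ind max_gap : Int) : Int :=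
  if h : 0 < positive_number then
    if is_last_bit_non_zero positive_number ≠ 0 then
      let max_gap' := match prev_non_zero_ind with
        | some p => max max_gap (current_ind - p - 1)
        | none => max_gap
      findLoopA (do_right_shift positive_number) (some current_ind) (current_ind + 1) max_gap'
    else
      findLoopA (do_right_shift positive_number) prev_non_zero_ind (current_ind + 1) max_gap
  else
    max_gap
termination_by positive_number.toNat
decreasing_by all_goals exact pv_shift_lt _ h

def find_max_bin_gap (positive_number : Int) : Int :=
  findLoopA positive_number none 0 0

-- ===== PORT B =====
-- _trailing_zeros of Source B: while m % 2 == 0 and m > 0: m //= 2; t += 1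
def tzLoop (m t : Int) : Int :=
  if h : PySem.Int.mod m 2 = 0 ∧ 0 < m then
    tzLoop (PySem.Int.floordiv m 2) (t + 1)
  else
    t
termination_by m.toNat
decreasing_by exact pv_half_lt _ h.2

def find_max_bin_gap_alt (positive_number : Int) : Int :=
  if _h : positive_number ≤ 1 then 0
  else
    -- q, r = divmod(positive_number, 2)   (divisor 2 ≠ 0)
    let q := PySem.Int.floordiv positive_number 2
    let r := PySem.Int.mod positive_number 2
    if r ≠ 0 then
      max (find_max_bin_gap_alt q) (tzLoop q 0)
    else
      find_max_bin_gap_alt q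
termination_by positive_number.toNat
decreasing_by all_goals exact pv_half_lt _ (by omega)

-- ===== PRECONDITION & SPEC =====
def Spec_find_max_bin_gap (positive_number : Int) (out : Int) : Prop := out = find_max_bin_gap_alt positive_number
instance (positive_number : Int) (out : Int) : Decidable (Spec_find_max_bin_gap positive_number out) := by unfold Spec_find_max_bin_gap; infer_instance

-- ===== CLAIM (what is proved, stated in full; the proofs are below) =====
def Claim_equal_find_max_bin_gap : Prop := ∀ (positive_number : Int), Dom_find_max_bin_gap positive_number → Spec_find_max_bin_gap positive_number (find_max_bin_gap positive_number)

-- ===== LEMMAS AND PROOFS =====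

theorem pv_sr1 (n : Int) : n >>> (1:Nat) = PySem.Int.floordiv n 2 := by
  rw [PySem.Int.floordiv_eq_ediv_of_pos (by norm_num), Int.shiftRight_eq_div_pow]
  norm_num

theorem pv_mod_emod (n : Int) : PySem.Int.mod n 2 = n % 2 :=
  PySem.Int.mod_eq_emod_of_pos (by norm_num)

theorem pv_div_ediv (n : Int) : PySem.Int.floordiv n 2 = n / 2 :=
  PySem.Int.floordiv_eq_ediv_of_pos (by norm_num)

theorem pv_mod2 (n : Int) : PySem.Int.mod n 2 = 0 ∨ PySem.Int.mod n 2 = 1 := by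
  rw [pv_mod_emod]; omega

theorem pv_half_pos (n : Int) (h : 2 ≤ n) : 0 < PySem.Int.floordiv n 2 := by
  rw [pv_div_ediv]; omega

-- the accumulator of tzLoop is additive
theorem pv_tz_acc : ∀ (k : Nat) (m t : Int), m.toNat ≤ k → tzLoop m t = t + tzLoop m 0 := by
  intro k
  induction k with
  | zero =>
    intro m t hm
    have hg : ¬ (PySem.Int.mod m 2 = 0 ∧ 0 < m) := by rintro ⟨_, h⟩; omega
    rw [tzLoop, dif_neg hg, tzLoop, dif_neg hg]
    ring
  | succ k ih =>
    intro m t hm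
    by_cases hg : PySem.Int.mod m 2 = 0 ∧ 0 < m
    · have hlt := pv_half_lt m hg.2
      have hL : tzLoop m t = tzLoop (PySem.Int.floordiv m 2) (t + 1) := by
        rw [tzLoop]; rw [dif_pos hg]
      have hR : tzLoop m 0 = tzLoop (PySem.Int.floordiv m 2) (0 + 1) := by
        rw [tzLoop]; rw [dif_pos hg]
      rw [hL, hR, ih _ (t + 1) (by omega), ih _ (0 + 1) (by omega)]
      ring
    · have hL : tzLoop m t = t := by rw [tzLoop]; rw [dif_neg hg]
      have hR : tzLoop m 0 = 0 := by rw [tzLoop]; rw [dif_neg hg]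
      rw [hL, hR]
      ring

theorem pv_tz_nonneg : ∀ (k : Nat) (m t : Int), m.toNat ≤ k → t ≤ tzLoop m t := by
  intro k
  induction k with
  | zero =>
    intro m t hm
    have hg : ¬ (PySem.Int.mod m 2 = 0 ∧ 0 < m) := by rintro ⟨_, h⟩; omega
    rw [tzLoop, dif_neg hg]
  | succ k ih =>
    intro m t hm
    by_cases hg : PySem.Int.mod m 2 = 0 ∧ 0 < m
    · have hlt := pv_half_lt m hg.2
      rw [tzLoop, dif_pos hg]
      have := ih (PySem.Int.floordiv m 2) (t + 1) (by omega)
      omega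
    · rw [tzLoop, dif_neg hg]

theorem pv_tz_odd (m : Int) (h : PySem.Int.mod m 2 = 1) : tzLoop m 0 = 0 := by
  have hg : ¬ (PySem.Int.mod m 2 = 0 ∧ 0 < m) := by rintro ⟨h0, _⟩; omega
  rw [tzLoop, dif_neg hg]

theorem pv_tz_even (m : Int) (h0 : 0 < m) (h : PySem.Int.mod m 2 = 0) :
    tzLoop m 0 = 1 + tzLoop (PySem.Int.floordiv m 2) 0 := by
  rw [tzLoop, dif_pos ⟨h, h0⟩]
  have hlt := pv_half_lt m h0
  rw [pv_tz_acc (PySem.Int.floordiv m 2).toNat _ _ (le_refl _)]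
  ring

-- unfoldings of find_max_bin_gap_alt
theorem pv_alt_le_one (n : Int) (h : n ≤ 1) : find_max_bin_gap_alt n = 0 := by
  rw [find_max_bin_gap_alt, dif_pos h]

theorem pv_alt_even (n : Int) (h2 : 2 ≤ n) (h : PySem.Int.mod n 2 = 0) :
    find_max_bin_gap_alt n = find_max_bin_gap_alt (PySem.Int.floordiv n 2) := by
  rw [find_max_bin_gap_alt, dif_neg (by omega : ¬ n ≤ 1)]
  simp only [h, ne_eq, not_true_eq_false, if_false]

theorem pv_alt_odd (n : Int) (h2 : 2 ≤ n) (h : PySem.Int.mod n 2 = 1) :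
    find_max_bin_gap_alt n =
      max (find_max_bin_gap_alt (PySem.Int.floordiv n 2)) (tzLoop (PySem.Int.floordiv n 2) 0) := by
  rw [find_max_bin_gap_alt, dif_neg (by omega : ¬ n ≤ 1)]
  simp only [h, ne_eq, one_ne_zero, not_false_eq_true, if_true]

theorem pv_alt_nonneg : ∀ (k : Nat) (n : Int), n.toNat ≤ k → 0 ≤ find_max_bin_gap_alt n := by
  intro k
  induction k with
  | zero =>
    intro n hn
    rw [pv_alt_le_one n (by omega)]
  | succ k ih =>
    intro n hn
    by_cases h1 : n ≤ 1
    · rw [pv_alt_le_one n h1]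
    · have h2 : 2 ≤ n := by omega
      have hlt := pv_half_lt n (by omega)
      have hq := ih (PySem.Int.floordiv n 2) (by omega)
      rcases pv_mod2 n with hm | hm
      · rw [pv_alt_even n h2 hm]; exact hq
      · rw [pv_alt_odd n h2 hm]
        exact le_trans hq (le_max_left _ _)

-- the low bit of n read the way A reads it
theorem pv_bit_even (n : Int) (hm : PySem.Int.mod n 2 = 0) : ¬ is_last_bit_non_zero n ≠ 0 := by
  simp only [is_last_bit_non_zero, PySem.Int.band_one, hm, ne_eq, not_true_eq_false,
    not_false_eq_true]

theorem pv_bit_odd (n : Int) (hm : PySem.Int.mod n 2 = 1) : is_last_bit_non_zero n ≠ 0 := by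
  simp only [is_last_bit_non_zero, PySem.Int.band_one, hm, ne_eq, one_ne_zero,
    not_false_eq_true]

theorem pv_one_ne_even (hm : PySem.Int.mod (1 : Int) 2 = 0) : False := by
  rw [pv_mod_emod] at hm; omega

-- the loop of A with a previous one-bit recorded: the result is the max of max_gap, the
-- pending gap (closed by the next one-bit of n, if any) and the gaps inside n
theorem pv_loopA_some : ∀ (k : Nat) (n p cur g : Int), n.toNat ≤ k → 0 ≤ g → p + 1 ≤ cur →
    findLoopA n (some p) cur g =
      if 0 < n then
        max g (max ((cur - p - 1) + tzLoop n 0) (find_max_bin_gap_alt n))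
      else g := by
  intro k
  induction k with
  | zero =>
    intro n p cur g hn hg hp
    have h0 : ¬ (0 : Int) < n := by omega
    rw [findLoopA, dif_neg h0, if_neg h0]
  | succ k ih =>
    intro n p cur g hn hg hp
    by_cases h0 : 0 < n
    · rw [findLoopA, dif_pos h0, if_pos h0]
      have hlt : (PySem.Int.floordiv n 2).toNat < n.toNat := pv_half_lt n h0
      set q := PySem.Int.floordiv n 2 with hq
      have hsr : do_right_shift n = q := pv_sr1 n
      rcases pv_mod2 n with hm | hm
      · -- even bit: zero, the pending gap grows by one
        rw [if_neg (pv_bit_even n hm), hsr]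
        have h2 : 2 ≤ n := by
          rcases (by omega : n = 1 ∨ 2 ≤ n) with h | h
          · exact absurd (h ▸ hm) (fun hc => pv_one_ne_even hc)
          · exact h
        have hqpos : 0 < q := pv_half_pos n h2
        rw [ih q p (cur + 1) g (by omega) hg (by omega), if_pos hqpos]
        rw [pv_tz_even n h0 hm, pv_alt_even n h2 hm, ← hq]
        have harith : cur + 1 - p - 1 + tzLoop q 0 = cur - p - 1 + (1 + tzLoop q 0) := by ring
        rw [harith]
      · -- one bit: close the pending gap, restart the gap at the current index
        rw [if_pos (pv_bit_odd n hm), hsr]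
        rw [pv_tz_odd n hm]
        by_cases h1 : n = 1
        · subst h1
          have hq1 : q = 0 := by rw [hq]; decide
          rw [hq1, findLoopA, dif_neg (by omega : ¬ (0:Int) < 0)]
          rw [pv_alt_le_one 1 (by omega)]
          simp only [Int.max_def]
          split_ifs <;> omega
        · have h2 : 2 ≤ n := by omega
          have hqpos : 0 < q := pv_half_pos n h2
          have htz := pv_tz_nonneg q.toNat q 0 (le_refl _)
          have halt := pv_alt_nonneg q.toNat q (le_refl _)
          rw [ih q cur (cur + 1) (max g (cur - p - 1)) (by omega) (by omega) (by omega)]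
          rw [if_pos hqpos, pv_alt_odd n h2 hm, ← hq]
          simp only [Int.max_def]
          split_ifs <;> omega
    · rw [findLoopA, dif_neg h0, if_neg h0]

-- the loop of A before the first one-bit: leading zeros are ignored
theorem pv_loopA_none : ∀ (k : Nat) (n cur : Int), n.toNat ≤ k →
    findLoopA n none cur 0 = find_max_bin_gap_alt n := by
  intro k
  induction k with
  | zero =>
    intro n cur hn
    have h0 : ¬ (0 : Int) < n := by omega
    rw [findLoopA, dif_neg h0, pv_alt_le_one n (by omega)]
  | succ k ih =>
    intro n cur hn
    by_cases h0 : 0 < n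
    · rw [findLoopA, dif_pos h0]
      have hlt : (PySem.Int.floordiv n 2).toNat < n.toNat := pv_half_lt n h0
      set q := PySem.Int.floordiv n 2 with hq
      have hsr : do_right_shift n = q := pv_sr1 n
      rcases pv_mod2 n with hm | hm
      · rw [if_neg (pv_bit_even n hm), hsr]
        have h2 : 2 ≤ n := by
          rcases (by omega : n = 1 ∨ 2 ≤ n) with h | h
          · exact absurd (h ▸ hm) (fun hc => pv_one_ne_even hc)
          · exact h
        rw [ih q (cur + 1) (by omega), pv_alt_even n h2 hm]
      · rw [if_pos (pv_bit_odd n hm), hsr]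
        by_cases h1 : n = 1
        · subst h1
          have hq1 : q = 0 := by rw [hq]; decide
          rw [hq1, findLoopA, dif_neg (by omega : ¬ (0:Int) < 0)]
          rw [pv_alt_le_one 1 (by omega)]
        · have h2 : 2 ≤ n := by omega
          have hqpos : 0 < q := pv_half_pos n h2
          have htz := pv_tz_nonneg q.toNat q 0 (le_refl _)
          have halt := pv_alt_nonneg q.toNat q (le_refl _)
          rw [pv_loopA_some q.toNat q cur (cur + 1) 0 (le_refl _) (le_refl _) (by omega)]
          rw [if_pos hqpos, pv_alt_odd n h2 hm, ← hq]
          simp only [Int.max_def]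
          split_ifs <;> omega
    · rw [findLoopA, dif_neg h0, pv_alt_le_one n (by omega)]

-- ===== VERDICT (by name: the statement is the Claim_ definition above) =====
theorem find_max_bin_gap_spec : Claim_equal_find_max_bin_gap := by
  intro n _
  unfold Spec_find_max_bin_gap find_max_bin_gap
  exact pv_loopA_none n.toNat n 0 (le_refl _)
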